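-- pv_equiv track=rewrite | github.com/Wounded-Wolf/Project | function.py | check_duplicate_dates
-- ===== SOURCE A (Python) =====
-- def check_duplicate_dates(loaded_list, entered):
-- 	for i in range(len(loaded_list)):
-- 		for j in range(len(loaded_list[i])):
-- 			if(loaded_list[i][0] == entered):
-- 				return i # which is present
-- 			else:
-- 				pass
-- 	return -1
-- ===== SOURCE B (Python) =====
-- def check_duplicate_dates(loaded_list, entered):
--     heads = [row[0] if row else None for row in loaded_list]
--     try:
--         return heads.index(entered)
--     except ValueError:
--         return -1
-- ===== Notes on version B (the rewrite author's own statement) =====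
-- stated objective: alternative
-- what changed: A's nested scan (re-testing row[0]==entered once per element of each row) is replaced by a staged computation: project each row to its head (None for empty rows) in one map, then a single library list.index search for entered; worst-case cost drops from O(n*m) to O(n) though a timing run measured only ~1.48x on the generated inputs.
import Mathlib
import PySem

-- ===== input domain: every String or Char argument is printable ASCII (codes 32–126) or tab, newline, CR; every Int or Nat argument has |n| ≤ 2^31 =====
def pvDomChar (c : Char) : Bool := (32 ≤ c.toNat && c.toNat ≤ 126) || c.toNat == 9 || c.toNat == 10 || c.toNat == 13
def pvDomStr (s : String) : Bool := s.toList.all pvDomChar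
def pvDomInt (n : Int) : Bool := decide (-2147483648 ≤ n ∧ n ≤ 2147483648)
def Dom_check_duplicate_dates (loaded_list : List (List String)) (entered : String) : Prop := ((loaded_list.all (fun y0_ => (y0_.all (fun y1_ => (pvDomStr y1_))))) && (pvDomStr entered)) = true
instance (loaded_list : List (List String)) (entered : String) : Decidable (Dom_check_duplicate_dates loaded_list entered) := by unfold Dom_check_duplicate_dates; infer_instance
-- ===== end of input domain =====

-- B replaces A's nested scan by a staged computation: map rows to their heads, then one library index search.


-- ===== PORT A =====
-- inner loop: for j in range(len(row)): if row[0] == entered: return i else: pass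
-- (counter n = number of remaining iterations, starts at row.length)
def pvInnerA (row : List String) (entered : String) (i : Int) : Nat → Option Int
  | 0 => none
  | n + 1 =>
    if PySem.List.pyGet? row 0 = some entered then some i
    else pvInnerA row entered i n

-- outer loop: for i in range(len(loaded_list)): …; return -1
def pvOuterA (loaded : List (List String)) (entered : String) (i : Int) : Int :=
  match loaded with
  | [] => -1
  | row :: rest =>
    match pvInnerA row entered i row.length with
    | some v => v
    | none => pvOuterA rest entered (i + 1)

def check_duplicate_dates (loaded_list : List (List String)) (entered : String) : Int :=
  pvOuterA loaded_list entered 0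

-- ===== PORT B =====
-- row[0] if row else None
def pvHead (row : List String) : Option String :=
  match row with | [] => none | x :: _ => some x

-- heads = [row[0] if row else None for row in loaded_list]; return heads.index(entered) or -1
def check_duplicate_dates_alt (loaded_list : List (List String)) (entered : String) : Int :=
  let heads : List (Option String) :=
    loaded_list.map pvHead
  match PySem.List.index? heads (some entered) with
  | some k => (k : Int)
  | none => -1

-- ===== PRECONDITION & SPEC =====
def Spec_check_duplicate_dates (loaded_list : List (List String)) (entered : String) (out : Int) : Prop := out = check_duplicate_dates_alt loaded_list entered
instance (loaded_list : List (List String)) (entered : String) (out : Int) : Decidable (Spec_check_duplicate_dates loaded_list entered out) := by unfold Spec_check_duplicate_dates; infer_instance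

-- ===== CLAIM =====
def Claim_equal_check_duplicate_dates : Prop := ∀ (loaded_list : List (List String)) (entered : String), Dom_check_duplicate_dates loaded_list entered → Spec_check_duplicate_dates loaded_list entered (check_duplicate_dates loaded_list entered)

-- ===== LEMMAS AND PROOFS =====
-- A's inner loop returns `some i` iff it runs at least once and row[0] == entered
lemma pvInnerA_eq (row : List String) (entered : String) (i : Int) (n : Nat) :
    pvInnerA row entered i n =
      if n ≠ 0 ∧ PySem.List.pyGet? row 0 = some entered then some i else none := by
  induction n with
  | zero => simp [pvInnerA]
  | succ m ih => simp [pvInnerA, ih]; split_ifs <;> simp_all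

-- generalised correspondence: pvOuterA with offset i equals i + position found by index? on heads
lemma pvOuter_eq_index (loaded : List (List String)) (entered : String) (i : Int) :
    pvOuterA loaded entered i =
      match PySem.List.index?
        (loaded.map pvHead)
        (some entered) with
      | some k => i + (k : Int)
      | none => -1 := by
  induction loaded generalizing i with
  | nil => simp [pvOuterA, PySem.List.index?]
  | cons row rest ih =>
    cases row with
    | nil =>
      simp only [pvOuterA, pvInnerA_eq, List.map_cons, pvHead]
      rw [PySem.List.index?_cons_of_ne (List.map pvHead rest) (by simp)]
      simp only [ih]
      cases h : PySem.List.index? (rest.map pvHead) (some entered) with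
      | none => simp [h]
      | some k => simp [h]; push_cast; ring
    | cons x xs =>
      by_cases hx : x = entered
      · subst hx
        simp only [pvOuterA, pvInnerA_eq, List.map_cons, pvHead]
        rw [PySem.List.index?_cons_self]
        simp [PySem.List.pyGet?, PySem.List.pyIdx?]
      · simp only [pvOuterA, pvInnerA_eq, List.map_cons, pvHead]
        rw [PySem.List.index?_cons_of_ne (List.map pvHead rest) (by simp [hx])]
        have hget : ¬ (PySem.List.pyGet? (x :: xs) 0 = some entered) := by
          simp [PySem.List.pyGet?, PySem.List.pyIdx?, hx]
        simp only [hget, and_false, if_false, List.length_cons]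
        simp only [ih]
        cases h : PySem.List.index? (rest.map pvHead) (some entered) with
        | none => simp [h]
        | some k => simp [h]; push_cast; ring

-- ===== VERDICT =====
theorem check_duplicate_dates_spec : Claim_equal_check_duplicate_dates := by
  intro l e _
  unfold Spec_check_duplicate_dates check_duplicate_dates check_duplicate_dates_alt
  rw [pvOuter_eq_index]
  cases h : PySem.List.index? (l.map pvHead) (some e) <;> simp only [h] <;> simp
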